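-- pv_equiv track=rewrite | github.com/morcsanyitamas/blanagram_checker | blanagram_checker.py | is_blanagram
-- ===== SOURCE A (Python) =====
-- def format_text(text):
--     return sorted([letter.lower() for letter in text if letter.isalpha()])
--
-- def get_same_letter(text1, text2):
--     for letter in text1:
--         if letter in text2:
--             return letter
--     return None
--
-- def remove_letter(text, letter):
--     if letter in text:
--         text.pop(text.index(letter))
--
-- def is_blanagram(text1, text2):
--     text1_letters = format_text(text1)
--     text2_letters = format_text(text2)
--
--     if len(text1_letters) != len(text2_letters):
--         return False
--
--     if text1_letters == text2_letters:
--         return True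
--
--     iterator = iter(lambda: get_same_letter(text1_letters, text2_letters), None)
--     for same_letter in iterator:
--         remove_letter(text1_letters, same_letter)
--         remove_letter(text2_letters, same_letter)
--
--     return (len(text1_letters) == 1) and (len(text2_letters) == 1)
-- ===== SOURCE B (Python) =====
-- def is_blanagram(text1, text2):
--     a = [ch.lower() for ch in text1 if ch.isalpha()]
--     b = [ch.lower() for ch in text2 if ch.isalpha()]
--     if len(a) != len(b):
--         return False
--     avail = {}
--     for ch in b:
--         avail[ch] = avail.get(ch, 0) + 1
--     excess = 0
--     for ch in a:
--         if avail.get(ch, 0) > 0: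
--             avail[ch] -= 1
--         else:
--             excess += 1
--     return excess <= 1
-- ===== Notes on version B (the rewrite author's own statement) =====
-- stated objective: simpler
-- what changed: B replaces A's sort + repeated find-common-letter-and-remove loop (with its identical-lists and leftover-length-1 branches) by a single counting pass: build letter counts of one side and sweep the other once, returning True iff at most one letter is unmatched.
import Mathlib
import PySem

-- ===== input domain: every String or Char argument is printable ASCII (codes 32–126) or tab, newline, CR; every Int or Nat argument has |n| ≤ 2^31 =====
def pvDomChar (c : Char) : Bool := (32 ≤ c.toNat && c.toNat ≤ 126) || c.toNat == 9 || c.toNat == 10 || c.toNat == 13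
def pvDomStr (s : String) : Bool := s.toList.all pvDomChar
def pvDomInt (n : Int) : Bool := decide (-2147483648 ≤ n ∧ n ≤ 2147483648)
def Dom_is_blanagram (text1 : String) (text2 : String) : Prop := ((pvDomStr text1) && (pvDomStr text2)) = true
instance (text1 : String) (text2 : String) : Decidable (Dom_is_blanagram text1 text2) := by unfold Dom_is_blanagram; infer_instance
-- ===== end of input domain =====

-- B replaces A's repeated find-common-letter-and-remove loop by a single counting pass
-- (one multiset-matching sweep); objective: simpler control flow, no quadratic removal loop.

-- ===== PORT A =====
def format_text (text : String) : List Char :=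
  PySem.List.sorted ((text.toList.filter (fun letter => PySem.Chars.isalpha letter)).map
    (fun letter => PySem.Chars.lowerChar letter)) (fun x => x)

def get_same_letter (text1 : List Char) (text2 : List Char) : Option Char :=
  match text1 with
  | [] => none
  | letter :: rest => if text2.contains letter then some letter else get_same_letter rest text2

def remove_letter (text : List Char) (letter : Char) : List Char :=
  if text.contains letter then
    match PySem.List.index? text letter with
    | none => text                     -- unreachable: letter ∈ text
    | some i =>
      match PySem.List.pop? text (i : Int) with
      | none => text                   -- unreachable: index in range
      | some (_, rest) => rest
  else text

theorem get_same_letter_some_mem {t1 t2 : List Char} {c : Char}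
    (h : get_same_letter t1 t2 = some c) : c ∈ t1 ∧ c ∈ t2 := by
  induction t1 with
  | nil => simp [get_same_letter] at h
  | cons a rest ih =>
    by_cases ha : a ∈ t2
    · simp [get_same_letter, ha] at h
      subst h
      exact ⟨List.mem_cons_self, ha⟩
    · simp [get_same_letter, ha] at h
      exact ⟨List.mem_cons_of_mem _ (ih h).1, (ih h).2⟩

theorem idxOf?_of_mem {t : List Char} {c : Char} (h : c ∈ t) :
    List.idxOf? c t = some (List.idxOf c t) := by
  induction t with
  | nil => simp at h
  | cons a rest ih =>
    by_cases hac : a = c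
    · subst hac; simp [List.idxOf?_cons]
    · have h' : c ∈ rest := (List.mem_cons.mp h).resolve_left (fun e => hac e.symm)
      simp [List.idxOf?_cons, hac, ih h']

theorem remove_letter_eq_erase (t : List Char) (c : Char) :
    remove_letter t c = t.erase c := by
  by_cases hc : c ∈ t
  · have hidx : PySem.List.index? t c = some (List.idxOf c t) := idxOf?_of_mem hc
    have hlt : List.idxOf c t < t.length := List.idxOf_lt_length_of_mem hc
    have hget : t[List.idxOf c t]? = some (t[List.idxOf c t]'hlt) := List.getElem?_eq_getElem hlt
    simp only [remove_letter, List.contains_eq_mem, hc, decide_true, if_true, hidx,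
      PySem.List.pop?, PySem.List.pyIdx?]
    simp only [Int.natCast_nonneg, if_true, Int.toNat_natCast]
    rw [if_pos (by exact_mod_cast hlt)]
    simp only [Option.bind_some, hget, Option.map_some]
    exact (List.erase_eq_eraseIdx_of_idxOf rfl).symm
  · simp [remove_letter, List.contains_eq_mem, hc, List.erase_of_not_mem hc]

theorem remove_letter_length_lt (t : List Char) (c : Char) (h : c ∈ t) :
    (remove_letter t c).length < t.length := by
  rw [remove_letter_eq_erase]
  have := List.length_erase_of_mem h
  have : t.length ≠ 0 := by
    intro h0; rw [List.length_eq_zero_iff] at h0; subst h0; simp at h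
  omega

def blanagram_loop (t1 : List Char) (t2 : List Char) : List Char × List Char :=
  match h : get_same_letter t1 t2 with
  | none => (t1, t2)
  | some c => blanagram_loop (remove_letter t1 c) (remove_letter t2 c)
termination_by t1.length
decreasing_by
  exact remove_letter_length_lt t1 c (get_same_letter_some_mem h).1

def is_blanagram (text1 : String) (text2 : String) : Bool :=
  let text1_letters := format_text text1
  let text2_letters := format_text text2
  if text1_letters.length ≠ text2_letters.length then false
  else if text1_letters == text2_letters then true
  else
    let r := blanagram_loop text1_letters text2_letters
    r.1.length == 1 && r.2.length == 1

-- ===== PORT B =====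
def pvNormalize (text : String) : List Char :=
  (text.toList.filter (fun ch => PySem.Chars.isalpha ch)).map (fun ch => PySem.Chars.lowerChar ch)

def pvMatchStep (st : Int × PySem.Dict Char Int) (ch : Char) : Int × PySem.Dict Char Int :=
  if st.2.getD ch 0 > 0 then (st.1, st.2.insert ch (st.2.getD ch 0 - 1))
  else (st.1 + 1, st.2)

def is_blanagram_alt (text1 : String) (text2 : String) : Bool :=
  let a := pvNormalize text1
  let b := pvNormalize text2
  if a.length ≠ b.length then false
  else
    let avail := b.foldl (fun d ch => d.insert ch (d.getD ch 0 + 1)) PySem.Dict.empty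
    let st := a.foldl pvMatchStep (0, avail)
    decide (st.1 ≤ 1)

-- ===== PRECONDITION & SPEC =====
def Spec_is_blanagram (text1 : String) (text2 : String) (out : Bool) : Prop := out = is_blanagram_alt text1 text2
instance (text1 : String) (text2 : String) (out : Bool) : Decidable (Spec_is_blanagram text1 text2 out) := by unfold Spec_is_blanagram; infer_instance

-- ===== CLAIM (what is proved, stated in full; the proofs are below) =====
def Claim_equal_is_blanagram : Prop := ∀ (text1 : String) (text2 : String), Dom_is_blanagram text1 text2 → Spec_is_blanagram text1 text2 (is_blanagram text1 text2)

-- ===== LEMMAS AND PROOFS =====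

theorem get_same_letter_none {t1 t2 : List Char}
    (h : get_same_letter t1 t2 = none) : ∀ c ∈ t1, c ∉ t2 := by
  induction t1 with
  | nil => simp
  | cons a rest ih =>
    by_cases ha : a ∈ t2
    · simp [get_same_letter, ha] at h
    · simp [get_same_letter, ha] at h
      intro c hc
      rcases List.mem_cons.mp hc with rfl | hc'
      · exact ha
      · exact ih h c hc'

theorem erase_sub_erase (s t : Multiset Char) (c : Char) (hs : c ∈ s) (ht : c ∈ t) :
    s.erase c - t.erase c = s - t := by
  have hs1 : 1 ≤ s.count c := Multiset.one_le_count_iff_mem.mpr hs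
  have ht1 : 1 ≤ t.count c := Multiset.one_le_count_iff_mem.mpr ht
  ext a
  by_cases hac : a = c
  · subst hac
    simp [Multiset.count_sub, Multiset.count_erase_self]
    omega
  · simp [Multiset.count_sub, Multiset.count_erase_of_ne hac]

theorem blanagram_loop_spec (t1 t2 : List Char) :
    ((blanagram_loop t1 t2).1 : Multiset Char) = (↑t1 - ↑t2 : Multiset Char) ∧
    ((blanagram_loop t1 t2).2 : Multiset Char) = (↑t2 - ↑t1 : Multiset Char) := by
  fun_induction blanagram_loop t1 t2 with
  | case1 t1 t2 h =>
    have hd := get_same_letter_none h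
    constructor
    · ext a
      rw [Multiset.count_sub]
      by_cases ha : a ∈ t1
      · have h2 : a ∉ t2 := hd a ha
        simp [List.count_eq_zero_of_not_mem h2]
      · simp [List.count_eq_zero_of_not_mem ha]
    · ext a
      rw [Multiset.count_sub]
      by_cases ha : a ∈ t1
      · have h2 : a ∉ t2 := hd a ha
        simp [List.count_eq_zero_of_not_mem h2]
      · simp [List.count_eq_zero_of_not_mem ha]
  | case2 t1 t2 c h ih =>
    obtain ⟨hc1, hc2⟩ := get_same_letter_some_mem h
    rw [remove_letter_eq_erase, remove_letter_eq_erase] at ih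
    simp only [← Multiset.coe_erase] at ih
    rw [erase_sub_erase _ _ _ (by simpa using hc1) (by simpa using hc2)] at ih
    rw [erase_sub_erase _ _ _ (by simpa using hc2) (by simpa using hc1)] at ih
    rw [remove_letter_eq_erase, remove_letter_eq_erase]
    exact ih

theorem fold_match (a : List Char) (e : Int) (d : PySem.Dict Char Int) (m : Multiset Char)
    (hd : ∀ c, d.getD c 0 = (m.count c : Int)) :
    (a.foldl pvMatchStep (e, d)).1 = e + (((↑a : Multiset Char) - m).card : Int) := by
  induction a generalizing e d m with
  | nil => simp
  | cons ch rest ih =>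
    simp only [List.foldl_cons]
    by_cases hpos : 0 < m.count ch
    · have hstep : pvMatchStep (e, d) ch = (e, d.insert ch (d.getD ch 0 - 1)) := by
        simp only [pvMatchStep, hd ch]
        rw [if_pos (by exact_mod_cast hpos)]
      rw [hstep]
      have hd' : ∀ c, (d.insert ch (d.getD ch 0 - 1)).getD c 0 = (((m.erase ch).count c : Nat) : Int) := by
        intro c
        rw [PySem.Dict.getD_insert]
        by_cases hcch : c = ch
        · rw [if_pos hcch, hcch, hd ch, Multiset.count_erase_self]
          omega
        · rw [if_neg hcch, hd c, Multiset.count_erase_of_ne hcch]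
      rw [ih e _ _ hd']
      congr 2
      have hms : (↑(ch :: rest) : Multiset Char) - m = (↑rest : Multiset Char) - m.erase ch := by
        ext v
        rw [Multiset.count_sub, Multiset.count_sub]
        by_cases hv : v = ch
        · subst hv
          rw [Multiset.count_erase_self]
          simp only [Multiset.coe_count, List.count_cons_self]
          omega
        · rw [Multiset.count_erase_of_ne hv]
          simp only [Multiset.coe_count, List.count_cons, beq_iff_eq]
          rw [if_neg (fun e : ch = v => hv e.symm)]
          omega
      rw [hms]
    · have h0 : m.count ch = 0 := by omega
      have hstep : pvMatchStep (e, d) ch = (e + 1, d) := by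
        simp only [pvMatchStep, hd ch, h0]
        norm_num
      rw [hstep, ih (e + 1) _ _ hd]
      have hms : (↑(ch :: rest) : Multiset Char) - m = ch ::ₘ ((↑rest : Multiset Char) - m) := by
        ext v
        rw [Multiset.count_sub, Multiset.count_cons, Multiset.count_sub]
        by_cases hv : v = ch
        · subst hv
          simp only [Multiset.coe_count, List.count_cons_self, h0]
          simp
        · simp only [Multiset.coe_count, List.count_cons, beq_iff_eq]
          rw [if_neg (fun e : ch = v => hv e.symm), if_neg hv]
          omega
      rw [hms, Multiset.card_cons]
      push_cast
      ring

theorem sorted_eq_of_coe_eq (l1 l2 : List Char)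
    (h : (↑l1 : Multiset Char) = (↑l2 : Multiset Char)) :
    PySem.List.sorted l1 (fun x => x) = PySem.List.sorted l2 (fun x => x) := by
  have hp : l1.Perm l2 := Multiset.coe_eq_coe.mp h
  refine List.Perm.eq_of_pairwise (le := (· ≤ · : Char → Char → Prop))
    (fun a b _ _ hab hba => le_antisymm hab hba) ?_ ?_ ?_
  · exact PySem.List.sorted_pairwise l1 (fun x => x)
  · exact PySem.List.sorted_pairwise l2 (fun x => x)
  · exact ((PySem.List.sorted_perm l1 (fun x : Char => x) false).trans hp).trans
      (PySem.List.sorted_perm l2 (fun x : Char => x) false).symm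

theorem card_sub_comm (s t : Multiset Char) (h : Multiset.card s = Multiset.card t) :
    (s - t).card = (t - s).card := by
  have h1 := Multiset.sub_add_inter s t
  have h2 := Multiset.sub_add_inter t s
  have h3 : s ∩ t = t ∩ s := Multiset.inter_comm s t
  have c1 := congrArg Multiset.card h1
  have c2 := congrArg Multiset.card h2
  have c3 := congrArg Multiset.card h3
  simp [Multiset.card_add] at c1 c2
  omega

theorem main_lists (a b : List Char) :
    (if (PySem.List.sorted a (fun x => x)).length ≠ (PySem.List.sorted b (fun x => x)).length then false
     else if PySem.List.sorted a (fun x => x) == PySem.List.sorted b (fun x => x) then true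
     else ((blanagram_loop (PySem.List.sorted a (fun x => x)) (PySem.List.sorted b (fun x => x))).1.length == 1 &&
           (blanagram_loop (PySem.List.sorted a (fun x => x)) (PySem.List.sorted b (fun x => x))).2.length == 1))
    = (if a.length ≠ b.length then false
       else decide ((a.foldl pvMatchStep (0,
         b.foldl (fun d ch => d.insert ch (d.getD ch 0 + 1)) PySem.Dict.empty)).1 ≤ 1)) := by
  set t1 := PySem.List.sorted a (fun x => x) with ht1
  set t2 := PySem.List.sorted b (fun x => x) with ht2
  have hp1 : t1.Perm a := PySem.List.sorted_perm a (fun x : Char => x) false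
  have hp2 : t2.Perm b := PySem.List.sorted_perm b (fun x : Char => x) false
  have hm1 : (↑t1 : Multiset Char) = ↑a := Multiset.coe_eq_coe.mpr hp1
  have hm2 : (↑t2 : Multiset Char) = ↑b := Multiset.coe_eq_coe.mpr hp2
  have hB : (a.foldl pvMatchStep (0,
      b.foldl (fun d ch => d.insert ch (d.getD ch 0 + 1)) PySem.Dict.empty)).1
      = ((((↑a : Multiset Char) - ↑b).card : Nat) : Int) := by
    rw [PySem.Dict.foldl_insert_getD_add_one_eq_counter]
    rw [fold_match a 0 _ (↑b) (fun c => by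
      rw [PySem.Dict.getD_counter]; simp [Multiset.coe_count])]
    ring
  by_cases hlen : t1.length = t2.length
  · have hlab : a.length = b.length := by rw [← hp1.length_eq, ← hp2.length_eq]; exact hlen
    rw [if_neg (show ¬ a.length ≠ b.length from by omega)]
    rw [if_neg (show ¬ t1.length ≠ t2.length from by omega)]
    rw [hB]
    by_cases heq : t1 = t2
    · have hab : (↑a : Multiset Char) = ↑b := by rw [← hm1, ← hm2, heq]
      rw [if_pos (show (t1 == t2) = true from by simp [heq]), hab]
      simp
    · rw [if_neg (show ¬ (t1 == t2) = true from by simp [heq])]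
      obtain ⟨hr1, hr2⟩ := blanagram_loop_spec t1 t2
      have hcards : Multiset.card (↑t2 : Multiset Char) = Multiset.card (↑t1 : Multiset Char) := by
        simp [hlen]
      have hk1 : (blanagram_loop t1 t2).1.length = ((↑a : Multiset Char) - ↑b).card := by
        rw [← Multiset.coe_card, hr1, hm1, hm2]
      have hk2 : (blanagram_loop t1 t2).2.length = ((↑a : Multiset Char) - ↑b).card := by
        rw [← Multiset.coe_card, hr2, card_sub_comm _ _ hcards, hm1, hm2]
      have hknz : ((↑a : Multiset Char) - ↑b).card ≠ 0 := by
        intro h0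
        have hsub0 : (↑a : Multiset Char) - ↑b = 0 := Multiset.card_eq_zero.mp h0
        have hle : (↑a : Multiset Char) ≤ ↑b := tsub_eq_zero_iff_le.mp hsub0
        have hcab : Multiset.card (↑b : Multiset Char) ≤ Multiset.card (↑a : Multiset Char) := by
          simp [hlab]
        have hab : (↑a : Multiset Char) = ↑b := Multiset.eq_of_le_of_card_le hle hcab
        exact heq (by rw [ht1, ht2]; exact sorted_eq_of_coe_eq a b hab)
      rw [hk1, hk2]
      set k := ((↑a : Multiset Char) - ↑b).card with hkdef
      by_cases hk : k = 1
      · simp [hk]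
      · have hi : ¬ (((k : Nat) : Int) ≤ 1) := by omega
        simp [hk, hi]
  · have hlab : a.length ≠ b.length := by rw [← hp1.length_eq, ← hp2.length_eq]; exact hlen
    rw [if_pos (show a.length ≠ b.length from hlab)]
    rw [if_pos (show t1.length ≠ t2.length from hlen)]

-- ===== VERDICT (by name: the statement is the Claim_ definition above) =====
theorem is_blanagram_spec : Claim_equal_is_blanagram := by
  intro text1 text2 _
  show is_blanagram text1 text2 = is_blanagram_alt text1 text2
  exact main_lists (pvNormalize text1) (pvNormalize text2)
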